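-- pv_equiv track=rewrite | github.com/jbnicholson/IFSC10202 | Project/08.Project/08.Project.py | find_sections
-- ===== SOURCE A (Python) =====
-- def find_sections(lines, term):
--     term = term.lower()
--     sections = []
--     i = 0
--
--     while i < len(lines):
--         if term in lines[i].lower():
--             # find the start of this section (goes up until a blank line)
--             start = i
--             while start > 0 and lines[start - 1] != "":
--                 start = start - 1
--
--             #find the end of this section (goes down until a blank line)
--             end = i
--             while end < len(lines) - 1 and lines[end + 1] != "":
--                 end = end + 1
--             sections.append((start, end))
--
--             # skip to the next section
--             i = end + 1
--         else:
--             i = i + 1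
--
--     return sections
-- ===== SOURCE B (Python) =====
-- def find_sections(lines, term):
--     t = term.lower()
--     n = len(lines)
--     # left boundary of the section containing index i (expansion stops at blank lines)
--     L = [0] * n
--     for i in range(n):
--         L[i] = i if i == 0 or lines[i - 1] == "" else L[i - 1]
--     # right boundary of the section containing index i
--     R = [0] * n
--     for i in range(n - 1, -1, -1):
--         R[i] = i if i == n - 1 or lines[i + 1] == "" else R[i + 1]
--     sections = []
--     i = 0
--     while i < n:
--         if t in lines[i].lower():
--             sections.append((L[i], R[i]))
--             i = R[i] + 1
--         else:
--             i += 1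
--     return sections
-- ===== Notes on version B (the rewrite author's own statement) =====
-- stated objective: alternative
-- what changed: B precomputes left/right section-boundary arrays in two linear passes and looks them up during the scan, instead of A's inline up/down while-loop expansion at each match.
import Mathlib
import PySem

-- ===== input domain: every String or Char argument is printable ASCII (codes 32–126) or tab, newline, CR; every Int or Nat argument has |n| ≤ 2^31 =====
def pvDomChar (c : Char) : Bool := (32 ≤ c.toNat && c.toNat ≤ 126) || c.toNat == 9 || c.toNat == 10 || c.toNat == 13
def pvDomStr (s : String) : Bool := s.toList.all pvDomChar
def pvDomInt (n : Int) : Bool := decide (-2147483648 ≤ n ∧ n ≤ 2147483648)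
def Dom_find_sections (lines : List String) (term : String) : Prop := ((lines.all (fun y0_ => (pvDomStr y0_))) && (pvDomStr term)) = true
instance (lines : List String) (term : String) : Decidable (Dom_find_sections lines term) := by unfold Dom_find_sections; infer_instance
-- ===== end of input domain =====

-- ===== PORT A =====
-- B precomputes left/right section-boundary arrays in two linear passes and looks them up,
-- instead of A's inline up/down while-loop expansion at each match (alternative decomposition).
-- Port of A, step for step. `upA` is A's inner "start" while loop, `downA` its "end" while loop.
def upA (lines : List String) : Nat → Nat
  | 0 => 0
  | s + 1 => if lines.getD s "" ≠ "" then upA lines s else s + 1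

def downA (lines : List String) (e : Nat) : Nat :=
  if _h : e + 1 < lines.length ∧ lines.getD (e + 1) "" ≠ "" then downA lines (e + 1) else e
termination_by lines.length - e

-- needed by loopA's termination (the jump to end+1 moves right)
theorem le_downA (lines : List String) (e : Nat) : e ≤ downA lines e := by
  unfold downA
  split
  · exact Nat.le_of_succ_le (le_downA lines (e + 1))
  · exact Nat.le_refl e
termination_by lines.length - e

def loopA (lines : List String) (t : String) (i : Nat) : List (Int × Int) :=
  if _h : i < lines.length then
    if PySem.Str.isIn t (PySem.Str.lower (lines.getD i "")) then
      ((upA lines i : Int), (downA lines i : Int)) :: loopA lines t (downA lines i + 1)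
    else loopA lines t (i + 1)
  else []
termination_by lines.length - i
decreasing_by
  · have := le_downA lines i; omega
  · omega

def find_sections (lines : List String) (term : String) : List (Int × Int) :=
  loopA lines (PySem.Str.lower term) 0

-- ===== PORT B =====
-- Source B's first pass: buildL lines n = [L[0], …, L[n-1]], L[i] = i if i = 0 or lines[i-1] = "" else L[i-1].
def buildL (lines : List String) : Nat → List Nat
  | 0 => []
  | n + 1 =>
    let prev := buildL lines n
    prev ++ [if n = 0 ∨ lines.getD (n - 1) "" = "" then n else prev.getD (n - 1) 0]

-- Source B's second, right-to-left pass: buildR lines i = [R[i], …, R[n-1]],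
-- R[i] = i if i = n-1 or lines[i+1] = "" else R[i+1].
def buildR (lines : List String) (i : Nat) : List Nat :=
  if _h : i < lines.length then
    let rest := buildR lines (i + 1)
    (if i = lines.length - 1 ∨ lines.getD (i + 1) "" = "" then i else rest.getD 0 0) :: rest
  else []
termination_by lines.length - i

-- Source B's final while loop; fuel only makes it total (one unit per iteration, i strictly increases)
def loopB (lines : List String) (t : String) (L R : List Nat) : Nat → Nat → List (Int × Int)
  | 0, _ => []
  | fuel + 1, i =>
    if i < lines.length then
      if PySem.Str.isIn t (PySem.Str.lower (lines.getD i "")) then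
        ((L.getD i 0 : Int), (R.getD i 0 : Int)) :: loopB lines t L R fuel (R.getD i 0 + 1)
      else loopB lines t L R fuel (i + 1)
    else []

def find_sections_alt (lines : List String) (term : String) : List (Int × Int) :=
  let t := PySem.Str.lower term
  let L := buildL lines lines.length
  let R := buildR lines 0
  loopB lines t L R lines.length 0

-- ===== PRECONDITION & SPEC =====
def Spec_find_sections (lines : List String) (term : String) (out : List (Int × Int)) : Prop := out = find_sections_alt lines term
instance (lines : List String) (term : String) (out : List (Int × Int)) : Decidable (Spec_find_sections lines term out) := by unfold Spec_find_sections; infer_instance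

-- ===== CLAIM (what is proved, stated in full; the proofs are below) =====
def Claim_equal_find_sections : Prop := ∀ (lines : List String) (term : String), Dom_find_sections lines term → Spec_find_sections lines term (find_sections lines term)

-- ===== LEMMAS AND PROOFS =====

theorem buildL_length (lines : List String) (n : Nat) : (buildL lines n).length = n := by
  induction n with
  | zero => rfl
  | succ n ih => simp [buildL, ih]

theorem getD_buildL (lines : List String) (n i : Nat) (hi : i < n) :
    (buildL lines n).getD i 0 = upA lines i := by
  induction n generalizing i with
  | zero => omega
  | succ n ih =>
    simp only [buildL]
    rcases Nat.lt_or_ge i n with h | h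
    · rw [List.getD_append _ _ _ _ (by rw [buildL_length]; exact h)]
      exact ih i h
    · have hin : i = n := by omega
      subst hin
      rw [List.getD_eq_getElem?_getD, List.getElem?_append_right (by rw [buildL_length])]
      simp only [buildL_length, Nat.sub_self, List.getElem?_cons_zero, Option.getD_some]
      match i with
      | 0 => simp [upA]
      | m + 1 =>
        by_cases hb : lines.getD m "" = ""
        · have hb' : lines[m]?.getD "" = "" := by simpa [List.getD_eq_getElem?_getD] using hb
          rw [if_pos (Or.inr (by simpa using hb))]
          simp [upA, hb']
        · have hb' : ¬ lines[m]?.getD "" = "" := by simpa [List.getD_eq_getElem?_getD] using hb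
          rw [if_neg (by simp [hb']), Nat.add_sub_cancel]
          rw [ih m (by omega)]
          simp [upA, hb']

theorem getD_buildR (lines : List String) (i k : Nat) (h : i + k < lines.length) :
    (buildR lines i).getD k 0 = downA lines (i + k) := by
  unfold buildR
  rw [dif_pos (by omega)]
  match k with
  | 0 =>
    simp only [Nat.add_zero] at h ⊢
    rw [List.getD_cons_zero, downA]
    by_cases hc : i + 1 < lines.length ∧ lines.getD (i + 1) "" ≠ ""
    · rw [dif_pos hc, if_neg (by push Not; exact ⟨by omega, hc.2⟩)]
      have := getD_buildR lines (i + 1) 0 (by omega)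
      simpa using this
    · rw [dif_neg hc]
      rw [if_pos ?_]
      push Not at hc
      by_cases hlen : i + 1 < lines.length
      · exact Or.inr (by by_contra hne; exact hne (hc hlen))
      · exact Or.inl (by omega)
  | k + 1 =>
    rw [List.getD_cons_succ]
    have := getD_buildR lines (i + 1) k (by omega)
    rw [this]; congr 1; omega
termination_by lines.length - i

theorem loopB_eq_loopA (lines : List String) (t : String) (fuel i : Nat)
    (hf : lines.length ≤ fuel + i) :
    loopB lines t (buildL lines lines.length) (buildR lines 0) fuel i = loopA lines t i := by
  induction fuel generalizing i with
  | zero =>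
    rw [loopA, dif_neg (by omega)]
    rfl
  | succ fuel ihf =>
    rw [loopA]
    simp only [loopB]
    split
    · rename_i hi
      have hL := getD_buildL lines lines.length i hi
      have hR := getD_buildR lines 0 i (by omega)
      simp only [Nat.zero_add] at hR
      rw [hL, hR]
      split
      · congr 1
        exact ihf (downA lines i + 1) (by have := le_downA lines i; omega)
      · exact ihf (i + 1) (by omega)
    · rfl

-- ===== VERDICT (by name: the statement is the Claim_ definition above) =====
theorem find_sections_spec : Claim_equal_find_sections := by
  intro lines term _
  unfold Spec_find_sections find_sections find_sections_alt
  exact (loopB_eq_loopA lines (PySem.Str.lower term) lines.length 0 (by omega)).symm
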